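-- pv_equiv track=rewrite | github.com/ad-astra-per-ardua/Solving-Algorithm | acmicpc/18111.py | cal_time
-- ===== SOURCE A (Python) =====
-- def cal_time(heights, target_height, blocks):
--     remove_time = 0
--     add_time = 0
--     for height in heights:
--         if height > target_height:
--             remove_time += height - target_height
--         elif height < target_height:
--             add_time += target_height - height
--     return (remove_time * 2 + add_time, blocks + remove_time >= add_time)
-- ===== SOURCE B (Python) =====
-- def cal_time(heights, target_height, blocks):
--     # Sort the heights, locate the target by binary search, then obtain the
--     # remove/add times from prefix totals instead of per-element branching.
--     hs = sorted(heights)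
--     n = len(hs)
--     lo, hi = 0, n
--     while lo < hi:  # first index whose height is >= target_height
--         mid = (lo + hi) // 2
--         if hs[mid] < target_height:
--             lo = mid + 1
--         else:
--             hi = mid
--     below = sum(hs[:lo])
--     total = sum(hs)
--     add_time = target_height * lo - below
--     remove_time = (total - below) - target_height * (n - lo)
--     return (remove_time * 2 + add_time, blocks + remove_time >= add_time)
-- ===== Notes on version B (the rewrite author's own statement) =====
-- stated objective: alternative
-- what changed: B sorts the heights, binary-searches the first index at or above the target, and derives remove/add times from the prefix sum below that index and the grand total, instead of A's single pass with an if/elif per element.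
import Mathlib
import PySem

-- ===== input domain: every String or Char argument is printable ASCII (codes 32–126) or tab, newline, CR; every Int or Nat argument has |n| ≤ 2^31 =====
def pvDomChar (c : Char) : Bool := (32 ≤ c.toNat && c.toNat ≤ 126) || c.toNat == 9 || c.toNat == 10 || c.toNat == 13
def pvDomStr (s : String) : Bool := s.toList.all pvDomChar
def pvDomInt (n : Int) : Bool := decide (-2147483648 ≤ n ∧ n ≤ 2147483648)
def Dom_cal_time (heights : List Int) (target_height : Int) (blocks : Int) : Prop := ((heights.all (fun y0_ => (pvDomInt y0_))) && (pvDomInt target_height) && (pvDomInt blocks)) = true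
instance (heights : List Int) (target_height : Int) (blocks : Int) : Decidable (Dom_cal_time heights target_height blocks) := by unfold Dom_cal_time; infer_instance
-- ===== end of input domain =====

-- B sorts the heights, binary-searches the first index at/above the target, and derives the
-- remove/add times from the prefix sum and grand total; objective: alternative algorithm, same result.

-- ===== PORT A =====
def cal_time (heights : List Int) (target_height : Int) (blocks : Int) : Int × Bool :=
  let st := heights.foldl (fun (st : Int × Int) height =>
    if height > target_height then (st.1 + (height - target_height), st.2)
    else if height < target_height then (st.1, st.2 + (target_height - height))
    else st) (0, 0)
  (st.1 * 2 + st.2, decide (blocks + st.1 ≥ st.2))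

-- ===== PORT B =====
-- the 'while lo < hi' binary-search loop of Source B (hs[mid] is always in range: lo < hi ≤ len hs)
def bsLow (hs : List Int) (t : Int) (lo hi : Nat) : Nat :=
  if h : lo < hi then
    if hs.getD ((lo + hi) / 2) 0 < t then bsLow hs t ((lo + hi) / 2 + 1) hi
    else bsLow hs t lo ((lo + hi) / 2)
  else lo
termination_by hi - lo
decreasing_by all_goals omega

def cal_time_alt (heights : List Int) (target_height : Int) (blocks : Int) : Int × Bool :=
  let hs := PySem.List.sorted heights (fun x => x) false
  let n := hs.length
  let lo := bsLow hs target_height 0 n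
  -- hs[:lo] with lo ≥ 0 is exactly take lo; sum(...) is the fold of + from 0
  let below := (hs.take lo).foldl (· + ·) 0
  let total := hs.foldl (· + ·) 0
  let add_time := target_height * (lo : Int) - below
  let remove_time := (total - below) - target_height * ((n : Int) - (lo : Int))
  (remove_time * 2 + add_time, decide (blocks + remove_time ≥ add_time))

-- ===== PRECONDITION & SPEC =====
def Spec_cal_time (heights : List Int) (target_height : Int) (blocks : Int) (out : Int × Bool) : Prop := out = cal_time_alt heights target_height blocks
instance (heights : List Int) (target_height : Int) (blocks : Int) (out : Int × Bool) : Decidable (Spec_cal_time heights target_height blocks out) := by unfold Spec_cal_time; infer_instance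

-- ===== CLAIM (what is proved, stated in full; the proofs are below) =====
def Claim_equal_cal_time : Prop := ∀ (heights : List Int) (target_height : Int) (blocks : Int), Dom_cal_time heights target_height blocks → Spec_cal_time heights target_height blocks (cal_time heights target_height blocks)

-- ===== LEMMAS AND PROOFS =====

-- total blocks to remove / to add at target t
def remS (t : Int) (l : List Int) : Int := (l.map (fun h => max (h - t) 0)).sum
def addS (t : Int) (l : List Int) : Int := (l.map (fun h => max (t - h) 0)).sum

-- A's fold computes exactly (remS, addS)
theorem foldA_eq (t : Int) (l : List Int) : ∀ r a : Int,
    l.foldl (fun (st : Int × Int) height =>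
      if height > t then (st.1 + (height - t), st.2)
      else if height < t then (st.1, st.2 + (t - height))
      else st) (r, a) = (r + remS t l, a + addS t l) := by
  induction l with
  | nil => intro r a; simp [remS, addS]
  | cons h tl ih =>
    intro r a
    simp only [List.foldl, remS, addS, List.map_cons, List.sum_cons]
    split_ifs with h1 h2 <;>
      · rw [ih]
        simp only [remS, addS, Prod.mk.injEq]
        constructor <;> omega

theorem remS_perm (t : Int) {l₁ l₂ : List Int} (h : l₁.Perm l₂) : remS t l₁ = remS t l₂ :=
  (h.map _).sum_eq
theorem addS_perm (t : Int) {l₁ l₂ : List Int} (h : l₁.Perm l₂) : addS t l₁ = addS t l₂ :=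
  (h.map _).sum_eq

theorem sums_below (t : Int) (l : List Int) (hall : ∀ x ∈ l, x < t) :
    remS t l = 0 ∧ addS t l = t * l.length - l.sum := by
  induction l with
  | nil => simp [remS, addS]
  | cons h tl ih =>
    have hh := hall h (by simp)
    obtain ⟨ih1, ih2⟩ := ih (fun x hx => hall x (by simp [hx]))
    constructor
    · simp only [remS, List.map_cons, List.sum_cons]
      have hm : max (h - t) 0 = 0 := by omega
      rw [hm]; simpa [remS] using ih1
    · simp only [addS, List.map_cons, List.sum_cons, List.length_cons]
      have hm : max (t - h) 0 = t - h := by omega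
      rw [hm]
      have ih2' : (tl.map (fun h => max (t - h) 0)).sum = t * tl.length - tl.sum := ih2
      rw [ih2']
      push_cast
      ring

theorem sums_above (t : Int) (l : List Int) (hall : ∀ x ∈ l, t ≤ x) :
    remS t l = l.sum - t * l.length ∧ addS t l = 0 := by
  induction l with
  | nil => simp [remS, addS]
  | cons h tl ih =>
    have hh := hall h (by simp)
    obtain ⟨ih1, ih2⟩ := ih (fun x hx => hall x (by simp [hx]))
    constructor
    · simp only [remS, List.map_cons, List.sum_cons, List.length_cons]
      have hm : max (h - t) 0 = h - t := by omega
      rw [hm]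
      have ih1' : (tl.map (fun h => max (h - t) 0)).sum = tl.sum - t * tl.length := ih1
      rw [ih1']
      push_cast
      ring
    · simp only [addS, List.map_cons, List.sum_cons]
      have hm : max (t - h) 0 = 0 := by omega
      rw [hm]; simpa [addS] using ih2

-- binary-search correctness on a list monotone in its indices
theorem bsLow_spec (hs : List Int) (t : Int)
    (hmono : ∀ (i j : Nat) (hij : i ≤ j) (hj : j < hs.length), hs[i]'(Nat.lt_of_le_of_lt hij hj) ≤ hs[j])
    (lo hi : Nat) (h1 : lo ≤ hi) (h2 : hi ≤ hs.length)
    (hlo : ∀ i : Nat, (h : i < hs.length) → i < lo → hs[i] < t)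
    (hhi : ∀ i : Nat, (h : i < hs.length) → hi ≤ i → t ≤ hs[i]) :
    bsLow hs t lo hi ≤ hs.length ∧
    (∀ i : Nat, (h : i < hs.length) → i < bsLow hs t lo hi → hs[i] < t) ∧
    (∀ i : Nat, (h : i < hs.length) → bsLow hs t lo hi ≤ i → t ≤ hs[i]) := by
  unfold bsLow
  split
  · rename_i hlt
    have hmid : (lo + hi) / 2 < hs.length := by omega
    rw [List.getD_eq_getElem hs 0 hmid]
    split
    · rename_i hcmp
      refine bsLow_spec hs t hmono ((lo + hi) / 2 + 1) hi (by omega) h2 ?_ hhi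
      intro i h hi'
      calc hs[i] ≤ hs[(lo + hi) / 2]'hmid := hmono i ((lo + hi) / 2) (by omega) hmid
        _ < t := hcmp
    · rename_i hcmp
      refine bsLow_spec hs t hmono lo ((lo + hi) / 2) (by omega) (by omega) hlo ?_
      intro i h hi'
      calc t ≤ hs[(lo + hi) / 2]'hmid := not_lt.mp hcmp
        _ ≤ hs[i] := hmono ((lo + hi) / 2) i hi' h
  · exact ⟨by omega, fun i h hi' => hlo i h (by omega), fun i h hi' => hhi i h (by omega)⟩
termination_by hi - lo
decreasing_by all_goals omega

theorem foldl_add_eq_sum (l : List Int) : l.foldl (· + ·) 0 = l.sum := List.sum_eq_foldl.symm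

-- ===== VERDICT (by name: the statement is the Claim_ definition above) =====
theorem cal_time_spec : Claim_equal_cal_time := by
  intro heights t blocks _
  unfold Spec_cal_time cal_time
  simp only [foldA_eq, zero_add, cal_time_alt]
  set hs := PySem.List.sorted heights (fun x => x) false with hhs
  have hperm : hs.Perm heights := PySem.List.sorted_perm heights (fun x => x) false
  have hmono : ∀ (i j : Nat) (hij : i ≤ j) (hj : j < hs.length),
      hs[i]'(Nat.lt_of_le_of_lt hij hj) ≤ hs[j] := by
    intro i j hij hj
    exact PySem.List.sorted_id_getElem_mono heights hij hj
  set k := bsLow hs t 0 hs.length with hk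
  obtain ⟨hkle, hbelow, habove⟩ := bsLow_spec hs t hmono 0 hs.length (by omega) (le_refl _)
    (fun i h hi' => absurd hi' (by omega)) (fun i h hi' => absurd h (by omega))
  rw [← hk] at hkle hbelow habove
  have hsplit : hs = hs.take k ++ hs.drop k := (List.take_append_drop k hs).symm
  have htklen : (hs.take k).length = k := by rw [List.length_take]; omega
  have htk : ∀ x ∈ hs.take k, x < t := by
    intro x hx
    obtain ⟨i, hi, hix⟩ := List.mem_iff_getElem.mp hx
    rw [List.getElem_take] at hix
    exact hix ▸ hbelow i (by rw [htklen] at hi; omega) (by rw [htklen] at hi; omega)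
  have hdp : ∀ x ∈ hs.drop k, t ≤ x := by
    intro x hx
    obtain ⟨i, hi, hix⟩ := List.mem_iff_getElem.mp hx
    rw [List.getElem_drop] at hix
    exact hix ▸ habove (k + i) (by rw [List.length_drop] at hi; omega) (by omega)
  obtain ⟨hr1, ha1⟩ := sums_below t (hs.take k) htk
  obtain ⟨hr2, ha2⟩ := sums_above t (hs.drop k) hdp
  have hrsplit : remS t hs = remS t (hs.take k) + remS t (hs.drop k) := by
    conv_lhs => rw [hsplit]
    simp [remS]
  have hasplit : addS t hs = addS t (hs.take k) + addS t (hs.drop k) := by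
    conv_lhs => rw [hsplit]
    simp [addS]
  have hTD : (hs.take k).sum + (hs.drop k).sum = hs.sum := List.sum_take_add_sum_drop hs k
  have hDlen : ((hs.drop k).length : Int) = (hs.length : Int) - (k : Int) := by
    rw [List.length_drop]; omega
  have hremE : remS t heights = (hs.foldl (· + ·) 0 - (hs.take k).foldl (· + ·) 0) -
      t * ((hs.length : Int) - (k : Int)) := by
    rw [foldl_add_eq_sum, foldl_add_eq_sum]
    rw [← remS_perm t hperm, hrsplit, hr1, hr2, hDlen, ← hTD]
    ring
  have haddE : addS t heights = t * (k : Int) - (hs.take k).foldl (· + ·) 0 := by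
    rw [foldl_add_eq_sum]
    rw [← addS_perm t hperm, hasplit, ha1, ha2, htklen]
    ring
  rw [hremE, haddE]
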